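-- pv_equiv track=rewrite | github.com/YiyongZhao/PhyloTracer | GD_Detector.py | count_elements_in_lists
-- ===== SOURCE A (Python) =====
-- from collections import Counter
--
-- def merge_and_filter_types(
--     data: dict,
--     merge_map: dict
-- ) -> dict:
--     """
--     Merge and filter event types in the input data according to the merge_map.
--
--     Args:
--         data (dict): A dictionary where keys are identifiers and values are Counter objects of event types.
--         merge_map (dict): A mapping from new event types to lists of event types to be merged.
--
--     Returns:
--         dict: A dictionary with the same keys as data, but with merged event type counts.
--     """
--     merged_data = {}
--     for key, counter in data.items():
--         new_counter = Counter()
--         for event_type, count in counter.items():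
--             merged = False
--             for new_type, types_to_merge in merge_map.items():
--                 if event_type in types_to_merge:
--                     new_counter[new_type] += count
--                     merged = True
--                     break
--             if not merged and event_type == 'AB<=>AB':
--                 new_counter['ABAB'] += count
--         merged_data[key] = new_counter
--     return merged_data
--
-- def count_elements_in_lists(data: dict) -> dict:
--     """
--     Count and merge event types in nested lists using merge_and_filter_types.
--
--     Args:
--         data (dict): A dictionary where keys are identifiers and values are lists of event types.
--
--     Returns:
--         dict: A dictionary with merged event type counts for each identifier.
--     """
--     counted_data = {key: Counter(value) for key, value in data.items()}
--     merge_map = {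
--         'ABB': ['AB<=>B', 'B<=>AB', 'XB<=>AB', 'AB<=>XB'],
--         'AAB': ['AB<=>A', 'A<=>AB', 'AX<=>AB', 'AB<=>AX']
--     }
--     result = merge_and_filter_types(counted_data, merge_map)
--     return result
-- ===== SOURCE B (Python) =====
-- from collections import Counter
--
-- # Reverse index: source event type -> merged target type (includes the AB<=>AB special case).
-- _REV_INDEX = {
--     'AB<=>B': 'ABB', 'B<=>AB': 'ABB', 'XB<=>AB': 'ABB', 'AB<=>XB': 'ABB',
--     'AB<=>A': 'AAB', 'A<=>AB': 'AAB', 'AX<=>AB': 'AAB', 'AB<=>AX': 'AAB',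
--     'AB<=>AB': 'ABAB',
-- }
--
-- def count_elements_in_lists(data: dict) -> dict:
--     result = {}
--     for key, events in data.items():
--         new_counter = Counter()
--         for event in events:
--             target = _REV_INDEX.get(event)
--             if target is not None:
--                 new_counter[target] += 1
--         result[key] = new_counter
--     return result
-- ===== Notes on version B (the rewrite author's own statement) =====
-- stated objective: faster
-- what changed: Replaces A's two phases (building Counter(value) per key, then scanning the merge-map lists for each distinct event type with a break flag) by one precomputed reverse-index dict mapping each source event type to its merged target, so each key's merged counter is built in a single index-driven pass over the raw event list.
import Mathlib
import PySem

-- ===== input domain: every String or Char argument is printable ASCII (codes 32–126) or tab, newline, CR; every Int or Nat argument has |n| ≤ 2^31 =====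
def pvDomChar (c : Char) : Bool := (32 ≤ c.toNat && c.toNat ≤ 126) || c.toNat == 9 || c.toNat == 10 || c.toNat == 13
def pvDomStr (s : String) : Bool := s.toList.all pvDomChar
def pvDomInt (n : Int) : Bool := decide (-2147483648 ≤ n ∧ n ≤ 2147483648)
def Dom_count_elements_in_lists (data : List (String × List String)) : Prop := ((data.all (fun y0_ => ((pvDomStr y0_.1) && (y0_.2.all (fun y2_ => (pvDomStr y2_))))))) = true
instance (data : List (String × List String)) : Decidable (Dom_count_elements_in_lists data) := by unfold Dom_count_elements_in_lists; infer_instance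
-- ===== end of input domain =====

-- B replaces A's two phases (build Counter(value), then scan the merge map per distinct event type)
-- by a single pass over the raw event list driven by one precomputed reverse-index dict: a single O(1)-lookup pass per key (objective: faster, constant factor).

-- ===== PORT A =====
def pvMergeMap : PySem.Dict String (List String) :=
  PySem.Dict.ofList
    [("ABB", ["AB<=>B", "B<=>AB", "XB<=>AB", "AB<=>XB"]),
     ("AAB", ["AB<=>A", "A<=>AB", "AX<=>AB", "AB<=>AX"])]
def merge_and_filter_types (data : PySem.Dict String (PySem.Dict String Int))
    (merge_map : PySem.Dict String (List String)) : PySem.Dict String (PySem.Dict String Int) :=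
  data.items.foldl (fun merged_data kc =>
    let new_counter := kc.2.items.foldl (fun nc ec =>
      let st := merge_map.items.foldl (fun (st : PySem.Dict String Int × Bool) nt =>
        if st.2 then st
        else if ec.1 ∈ nt.2 then (st.1.modify nt.1 0 (· + ec.2), true)
        else st) (nc, false)
      if !st.2 && ec.1 == "AB<=>AB" then st.1.modify "ABAB" 0 (· + ec.2) else st.1)
      PySem.Dict.empty
    merged_data.insert kc.1 new_counter) PySem.Dict.empty

def count_elements_in_lists (data : List (String × List String)) : List (String × List (String × Int)) :=
  let counted_data := data.foldl (fun d kv => d.insert kv.1 (PySem.Dict.counter kv.2)) PySem.Dict.empty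
  (merge_and_filter_types counted_data pvMergeMap).items.map (fun p => (p.1, p.2.items))

-- ===== PORT B =====
def pvRevIndex : PySem.Dict String String :=
  PySem.Dict.ofList
    [("AB<=>B", "ABB"), ("B<=>AB", "ABB"), ("XB<=>AB", "ABB"), ("AB<=>XB", "ABB"),
     ("AB<=>A", "AAB"), ("A<=>AB", "AAB"), ("AX<=>AB", "AAB"), ("AB<=>AX", "AAB"),
     ("AB<=>AB", "ABAB")]

def pvCountEvents (events : List String) : PySem.Dict String Int :=
  events.foldl (fun nc e =>
    match pvRevIndex.get? e with
    | some t => nc.modify t 0 (· + 1)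
    | none => nc) PySem.Dict.empty

def count_elements_in_lists_alt (data : List (String × List String)) : List (String × List (String × Int)) :=
  (data.foldl (fun res kv => res.insert kv.1 (pvCountEvents kv.2)) PySem.Dict.empty).items.map
    (fun p => (p.1, p.2.items))

-- ===== PRECONDITION & SPEC =====
def Spec_count_elements_in_lists (data : List (String × List String)) (out : List (String × List (String × Int))) : Prop := out = count_elements_in_lists_alt data
instance (data : List (String × List String)) (out : List (String × List (String × Int))) : Decidable (Spec_count_elements_in_lists data out) := by unfold Spec_count_elements_in_lists; infer_instance

-- ===== CLAIM (what is proved, stated in full; the proofs are below) =====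
def Claim_equal_count_elements_in_lists : Prop := ∀ (data : List (String × List String)), Dom_count_elements_in_lists data → Spec_count_elements_in_lists data (count_elements_in_lists data)

-- ===== LEMMAS AND PROOFS =====

-- A's inner-loop body (the merge-map scan with break, then the AB<=>AB check), named for the proofs.
def pvStepA (nc : PySem.Dict String Int) (ec : String × Int) : PySem.Dict String Int :=
  let st := pvMergeMap.items.foldl (fun (st : PySem.Dict String Int × Bool) nt =>
    if st.2 then st
    else if ec.1 ∈ nt.2 then (st.1.modify nt.1 0 (· + ec.2), true)
    else st) (nc, false)
  if !st.2 && ec.1 == "AB<=>AB" then st.1.modify "ABAB" 0 (· + ec.2) else st.1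

lemma pvStepA_eq (nc : PySem.Dict String Int) (ec : String × Int) :
    pvStepA nc ec = match pvRevIndex.get? ec.1 with
      | some t => nc.modify t 0 (· + ec.2)
      | none => nc := by
  rcases ec with ⟨e, c⟩
  by_cases h1 : e = "AB<=>B"; · subst h1; rfl
  by_cases h2 : e = "B<=>AB"; · subst h2; rfl
  by_cases h3 : e = "XB<=>AB"; · subst h3; rfl
  by_cases h4 : e = "AB<=>XB"; · subst h4; rfl
  by_cases h5 : e = "AB<=>A"; · subst h5; rfl
  by_cases h6 : e = "A<=>AB"; · subst h6; rfl
  by_cases h7 : e = "AX<=>AB"; · subst h7; rfl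
  by_cases h8 : e = "AB<=>AX"; · subst h8; rfl
  by_cases h9 : e = "AB<=>AB"; · subst h9; rfl
  have mm : pvMergeMap.items = [("ABB", ["AB<=>B", "B<=>AB", "XB<=>AB", "AB<=>XB"]),
      ("AAB", ["AB<=>A", "A<=>AB", "AX<=>AB", "AB<=>AX"])] := by rfl
  have ri : pvRevIndex.items = [("AB<=>B", "ABB"), ("B<=>AB", "ABB"), ("XB<=>AB", "ABB"),
      ("AB<=>XB", "ABB"), ("AB<=>A", "AAB"), ("A<=>AB", "AAB"), ("AX<=>AB", "AAB"),
      ("AB<=>AX", "AAB"), ("AB<=>AB", "ABAB")] := by rfl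
  have g1 : ("AB<=>B" == e) = false := by simp [Ne.symm h1]
  have g2 : ("B<=>AB" == e) = false := by simp [Ne.symm h2]
  have g3 : ("XB<=>AB" == e) = false := by simp [Ne.symm h3]
  have g4 : ("AB<=>XB" == e) = false := by simp [Ne.symm h4]
  have g5 : ("AB<=>A" == e) = false := by simp [Ne.symm h5]
  have g6 : ("A<=>AB" == e) = false := by simp [Ne.symm h6]
  have g7 : ("AX<=>AB" == e) = false := by simp [Ne.symm h7]
  have g8 : ("AB<=>AX" == e) = false := by simp [Ne.symm h8]
  have g9 : ("AB<=>AB" == e) = false := by simp [Ne.symm h9]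
  simp [pvStepA, mm, ri, PySem.Dict.get?, List.find?, g1, g2, g3, g4, g5, g6, g7, g8, g9,
    h1, h2, h3, h4, h5, h6, h7, h8, h9]

lemma pvMODMOD (d : PySem.Dict String Int) (k : String) (a b : Int) :
    (d.modify k 0 (· + a)).modify k 0 (· + b) = d.modify k 0 (· + (a + b)) := by
  simp only [PySem.Dict.modify]
  rw [PySem.Dict.getD_insert_self, PySem.Dict.insert_insert_self]
  ring_nf

lemma pvINSCOMM (d : PySem.Dict String Int) {t t' : String} (ht : d.contains t = true)
    (hne : t ≠ t') (v w : Int) :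
    (d.insert t v).insert t' w = (d.insert t' w).insert t v := by
  have c2 : (d.insert t' w).contains t = true := by
    simp [PySem.Dict.contains_insert, ht]
  have c1 : (d.insert t v).contains t' = d.contains t' := by
    simp [PySem.Dict.contains_insert, Ne.symm hne]
  by_cases ht' : d.contains t' = true
  · apply PySem.Dict.ext
    rw [PySem.Dict.items_insert_of_contains _ _ (by rw [c1]; exact ht'),
        PySem.Dict.items_insert_of_contains _ _ ht,
        PySem.Dict.items_insert_of_contains _ _ c2,
        PySem.Dict.items_insert_of_contains _ _ ht',
        List.map_map, List.map_map]
    apply List.map_congr_left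
    intro p _
    by_cases hp : p.1 = t
    · simp [hp, hne]
    · by_cases hp' : p.1 = t'
      · simp [hp', Ne.symm hne]
      · simp [hp, hp']
  · apply PySem.Dict.ext
    rw [PySem.Dict.items_insert_of_not_contains _ _ (by rw [c1]; simpa using ht'),
        PySem.Dict.items_insert_of_contains _ _ ht,
        PySem.Dict.items_insert_of_contains _ _ c2,
        PySem.Dict.items_insert_of_not_contains _ _ (by simpa using ht'),
        List.map_append]
    simp [Ne.symm hne]

lemma pvMODCOMM (d : PySem.Dict String Int) {t t' : String} (ht : d.contains t = true) (c : Int) :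
    (d.modify t 0 (· + 1)).modify t' 0 (· + c) = (d.modify t' 0 (· + c)).modify t 0 (· + 1) := by
  by_cases he : t' = t
  · subst he
    rw [pvMODMOD, pvMODMOD, add_comm]
  · simp only [PySem.Dict.modify]
    rw [PySem.Dict.getD_insert_of_ne _ _ _ he, PySem.Dict.getD_insert_of_ne _ _ _ (Ne.symm he)]
    exact pvINSCOMM d ht (Ne.symm he) _ _
  -- note getD_insert_of_ne signature: (d) (v d0) (h)? check

lemma pvContains_stepA (d : PySem.Dict String Int) {t : String} (ht : d.contains t = true)
    (p : String × Int) : (pvStepA d p).contains t = true := by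
  rw [pvStepA_eq]
  cases h : pvRevIndex.get? p.1 with
  | none => exact ht
  | some t' => simp [PySem.Dict.contains_modify, ht]

lemma pvCOMM (d : PySem.Dict String Int) {t : String} (ht : d.contains t = true)
    (p : String × Int) :
    pvStepA (d.modify t 0 (· + 1)) p = (pvStepA d p).modify t 0 (· + 1) := by
  rw [pvStepA_eq, pvStepA_eq]
  cases h : pvRevIndex.get? p.1 with
  | none => rfl
  | some t' => exact pvMODCOMM d ht p.2

lemma pvSL1 (l : List (String × Int)) (d : PySem.Dict String Int) {t : String}
    (ht : d.contains t = true) :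
    l.foldl pvStepA (d.modify t 0 (· + 1)) = (l.foldl pvStepA d).modify t 0 (· + 1) := by
  induction l generalizing d with
  | nil => rfl
  | cons p l ih =>
    simp only [List.foldl_cons]
    rw [pvCOMM d ht p, ih _ (pvContains_stepA d ht p)]

lemma pvGETD (l₁ l₂ : List (String × Int)) (x : String) (n : Int)
    (hx : x ∉ l₁.map Prod.fst) :
    (PySem.Dict.mk (l₁ ++ (x, n) :: l₂)).getD x 0 = n := by
  simp only [PySem.Dict.getD, PySem.Dict.get?, List.find?_append]
  have : l₁.find? (fun p => p.1 == x) = none := by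
    rw [List.find?_eq_none]
    intro p hp
    simp only [beq_iff_eq]
    exact fun h => hx (h ▸ List.mem_map_of_mem hp)
  simp [this, List.find?]

lemma pvM (c : PySem.Dict String Int) (hnd : c.keys.Nodup) (x : String) :
    (c.modify x 0 (· + 1)).items.foldl pvStepA PySem.Dict.empty =
      (match pvRevIndex.get? x with
        | some t => (c.items.foldl pvStepA PySem.Dict.empty).modify t 0 (· + 1)
        | none => c.items.foldl pvStepA PySem.Dict.empty) := by
  by_cases hc : c.contains x = true
  · -- x already counted: its entry is bumped in place
    obtain ⟨p, hp, hpx⟩ := List.mem_map.mp ((PySem.Dict.contains_iff_mem_keys c x).mp hc)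
    obtain ⟨l₁, l₂, hdecomp⟩ := List.append_of_mem hp
    have hitems : c.items = l₁ ++ (x, p.2) :: l₂ := by
      rw [hdecomp]
      congr 2
      rw [← hpx]
    set n := p.2 with hn
    have hkeys : (l₁.map Prod.fst ++ x :: l₂.map Prod.fst).Nodup := by
      have : c.keys = l₁.map Prod.fst ++ x :: l₂.map Prod.fst := by
        simp [PySem.Dict.keys, hitems]
      rwa [this] at hnd
    obtain ⟨nd1, nd2, disj⟩ := List.nodup_append.mp hkeys
    have hx1 : x ∉ l₁.map Prod.fst := by
      intro h
      exact disj x h x List.mem_cons_self rfl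
    have hx2 : x ∉ l₂.map Prod.fst := (List.nodup_cons.mp nd2).1
    have hgd : c.getD x 0 = n := by
      have hcmk : c = PySem.Dict.mk (l₁ ++ (x, n) :: l₂) := by
        cases c; simpa using hitems
      rw [hcmk]; exact pvGETD l₁ l₂ x n hx1
    have hitems' : (c.modify x 0 (· + 1)).items = l₁ ++ (x, n + 1) :: l₂ := by
      simp only [PySem.Dict.modify]
      rw [PySem.Dict.items_insert_of_contains _ _ hc, hgd, hitems]
      simp only [List.map_append, List.map_cons]
      congr 1
      · conv_rhs => rw [← List.map_id l₁]
        apply List.map_congr_left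
        intro q hq
        have : q.1 ≠ x := fun h => hx1 (h ▸ List.mem_map_of_mem hq)
        simp [this]
      · congr 1
        · simp
        · conv_rhs => rw [← List.map_id l₂]
          apply List.map_congr_left
          intro q hq
          have : q.1 ≠ x := fun h => hx2 (h ▸ List.mem_map_of_mem hq)
          simp [this]
    rw [hitems', hitems]
    simp only [List.foldl_append, List.foldl_cons]
    cases hfx : pvRevIndex.get? x with
    | none =>
      have e1 : pvStepA (l₁.foldl pvStepA PySem.Dict.empty) (x, n + 1) =
          l₁.foldl pvStepA PySem.Dict.empty := by rw [pvStepA_eq]; simp [hfx]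
      have e2 : pvStepA (l₁.foldl pvStepA PySem.Dict.empty) (x, n) =
          l₁.foldl pvStepA PySem.Dict.empty := by rw [pvStepA_eq]; simp [hfx]
      rw [e1, e2]
    | some t =>
      have e1 : pvStepA (l₁.foldl pvStepA PySem.Dict.empty) (x, n + 1) =
          ((l₁.foldl pvStepA PySem.Dict.empty).modify t 0 (· + n)).modify t 0 (· + 1) := by
        rw [pvStepA_eq]; simp only [hfx]; rw [pvMODMOD]
      have e2 : pvStepA (l₁.foldl pvStepA PySem.Dict.empty) (x, n) =
          (l₁.foldl pvStepA PySem.Dict.empty).modify t 0 (· + n) := by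
        rw [pvStepA_eq]; simp [hfx]
      rw [e1, e2, pvSL1 l₂ _ (by simp [PySem.Dict.contains_modify])]
  · -- x is new: a fresh entry (x, 1) is appended
    have hmod : c.modify x 0 (· + 1) = c.insert x 1 := by
      simp only [PySem.Dict.modify]
      rw [PySem.Dict.getD_of_not_contains _ _ (by simpa using hc)]
      norm_num
    rw [hmod, PySem.Dict.items_insert_of_not_contains _ _ (by simpa using hc),
        List.foldl_append]
    simp only [List.foldl_cons, List.foldl_nil]
    rw [pvStepA_eq]

lemma pvINNER (events : List String) :
    (PySem.Dict.counter events).items.foldl pvStepA PySem.Dict.empty = pvCountEvents events := by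
  induction events using List.reverseRecOn with
  | nil => rfl
  | append_singleton xs x ih =>
    rw [PySem.Dict.counter_append_singleton, pvM _ (PySem.Dict.nodup_keys_counter xs) x]
    unfold pvCountEvents
    rw [List.foldl_append]
    simp only [List.foldl_cons, List.foldl_nil]
    rw [← pvCountEvents, ← ih]

lemma pvCONTMAP (l : List (String × PySem.Dict String Int)) (k : String) :
    (PySem.Dict.mk (l.map (fun kc => (kc.1, kc.2.items.foldl pvStepA PySem.Dict.empty)))).contains k
      = (PySem.Dict.mk l).contains k := by
  simp [PySem.Dict.contains, List.any_map, Function.comp_def]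

lemma pvPUSH (data : List (String × List String))
    (d d' : PySem.Dict String (PySem.Dict String Int))
    (h : d'.items = d.items.map (fun kc => (kc.1, kc.2.items.foldl pvStepA PySem.Dict.empty))) :
    (data.foldl (fun d kv => d.insert kv.1 ((PySem.Dict.counter kv.2).items.foldl pvStepA PySem.Dict.empty)) d').items =
      (data.foldl (fun d kv => d.insert kv.1 (PySem.Dict.counter kv.2)) d).items.map
        (fun kc => (kc.1, kc.2.items.foldl pvStepA PySem.Dict.empty)) := by
  induction data generalizing d d' with
  | nil => exact h
  | cons kv data ih =>
    simp only [List.foldl_cons]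
    apply ih
    have hcont : d'.contains kv.1 = d.contains kv.1 := by
      cases d; cases d'
      simp only at h
      rw [show PySem.Dict.mk _ = _ from congrArg PySem.Dict.mk h] at *
      exact pvCONTMAP _ kv.1
    by_cases hc : d.contains kv.1 = true
    · rw [PySem.Dict.items_insert_of_contains _ _ (by rw [hcont]; exact hc),
          PySem.Dict.items_insert_of_contains _ _ hc, h, List.map_map, List.map_map]
      apply List.map_congr_left
      intro q _
      by_cases hq : q.1 = kv.1 <;> simp [hq]
    · rw [PySem.Dict.items_insert_of_not_contains _ _ (by rw [hcont]; simpa using hc),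
          PySem.Dict.items_insert_of_not_contains _ _ (by simpa using hc), h, List.map_append]
      simp


-- the two programs agree, including dict insertion order
lemma pvMAIN (data : List (String × List String)) :
    count_elements_in_lists data = count_elements_in_lists_alt data := by
  unfold count_elements_in_lists count_elements_in_lists_alt
  have hB : (fun (res : PySem.Dict String (PySem.Dict String Int)) (kv : String × List String) =>
        res.insert kv.1 (pvCountEvents kv.2)) =
      (fun res kv => res.insert kv.1 ((PySem.Dict.counter kv.2).items.foldl pvStepA PySem.Dict.empty)) := by
    funext res kv
    rw [pvINNER]
  rw [hB]
  set counted := data.foldl (fun d kv => d.insert kv.1 (PySem.Dict.counter kv.2)) PySem.Dict.empty with hcounted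
  have hA : merge_and_filter_types counted pvMergeMap =
      counted.items.foldl (fun md kc => md.insert kc.1 (kc.2.items.foldl pvStepA PySem.Dict.empty))
        PySem.Dict.empty := rfl
  have hnd : counted.keys.Nodup := by
    apply PySem.Dict.nodup_keys_foldl_insert_key data (fun kv => kv.1) (fun d kv => PySem.Dict.counter kv.2)
    simp [PySem.Dict.keys_empty]
  have hAitems : (merge_and_filter_types counted pvMergeMap).items =
      counted.items.map (fun kc => (kc.1, kc.2.items.foldl pvStepA PySem.Dict.empty)) := by
    rw [hA]
    rw [PySem.Dict.items_foldl_insert_fresh counted.items (fun kc => kc.1)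
      (fun kc => kc.2.items.foldl pvStepA PySem.Dict.empty) PySem.Dict.empty
      (by intro a _; simp [PySem.Dict.contains_empty]) (by exact hnd)]
    simp [PySem.Dict.empty]
  simp only [hAitems, pvPUSH data PySem.Dict.empty PySem.Dict.empty (by simp [PySem.Dict.empty])]
  rfl

-- ===== VERDICT (by name: the statement is the Claim_ definition above) =====
theorem count_elements_in_lists_spec : Claim_equal_count_elements_in_lists := by
  intro data _
  unfold Spec_count_elements_in_lists
  exact pvMAIN data
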